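-- pv_equiv track=rewrite | github.com/shuoyangd/stenella | scripts/debpe_lprobs.py | debpe
-- ===== SOURCE A (Python) =====
-- def debpe(toks):
--   idx_map = {}
--   new_idx = 0
--   new_toks = [""]
--   for old_idx, tok in enumerate(toks):
--     if tok.endswith("@@"):
--       idx_map[old_idx] = new_idx
--       new_toks[new_idx] += tok[:-2]
--     else:
--       idx_map[old_idx] = new_idx
--       new_toks[new_idx] += tok
--       new_toks.append("")
--       new_idx += 1
--   new_toks = new_toks[:-1]
--   return idx_map, new_toks
-- ===== SOURCE B (Python) =====
-- def debpe(toks):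
--   # Two independent passes: idx_map as a running prefix count of finished
--   # words, then new_toks by grouping (the trailing unterminated group,
--   # including the always-present empty one, is never emitted).
--   idx_map = {}
--   words_before = 0
--   for i, tok in enumerate(toks):
--     idx_map[i] = words_before
--     if not tok.endswith("@@"):
--       words_before += 1
--   new_toks = []
--   cur = ""
--   for tok in toks:
--     if tok.endswith("@@"):
--       cur += tok[:-2]
--     else:
--       new_toks.append(cur + tok)
--       cur = ""
--   return idx_map, new_toks
-- ===== Notes on version B (the rewrite author's own statement) =====
-- stated objective: alternative
-- what changed: Replaces A's single combined pass (dict + in-place growth of the last slot of a sentinel-terminated buffer, trimmed with [:-1]) by two independent passes: idx_map as a running prefix count of finished words, and new_toks by grouping with a current-word accumulator that never emits the trailing unterminated group.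
import Mathlib
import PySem

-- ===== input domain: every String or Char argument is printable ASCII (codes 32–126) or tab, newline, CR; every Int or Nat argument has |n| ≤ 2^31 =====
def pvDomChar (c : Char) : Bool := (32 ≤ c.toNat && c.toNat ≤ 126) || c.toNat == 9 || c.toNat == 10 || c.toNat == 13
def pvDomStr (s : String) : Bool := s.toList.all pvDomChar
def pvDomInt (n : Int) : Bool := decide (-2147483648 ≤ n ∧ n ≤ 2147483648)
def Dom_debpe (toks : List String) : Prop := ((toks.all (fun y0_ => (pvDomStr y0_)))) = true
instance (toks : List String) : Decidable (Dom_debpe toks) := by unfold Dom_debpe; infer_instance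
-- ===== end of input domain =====

-- ===== PORT A =====
-- B replaces A's single combined pass (dict + in-place growth of the last slot of a
-- sentinel-terminated buffer, trimmed with [:-1]) by two independent passes: a prefix
-- count for idx_map and a grouping accumulator for new_toks; same cost, different structure.
-- A's loop body. new_toks[new_idx] is read with pyGetD and written with pySetD
-- (total forms) — exact here because along A's loop new_idx = len(new_toks) - 1 ≥ 0,
-- so the index is always in range and Python never raises.
def debpeStepA (st : PySem.Dict Int Int × Int × List String) (p : Int × String) :
    PySem.Dict Int Int × Int × List String :=
  if PySem.Str.endswith p.2 "@@" then
    (st.1.insert p.1 st.2.1, st.2.1,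
      PySem.List.pySetD st.2.2 st.2.1
        (PySem.List.pyGetD st.2.2 st.2.1 "" ++ PySem.Str.slice p.2 none (some (-2))))
  else
    (st.1.insert p.1 st.2.1, st.2.1 + 1,
      PySem.List.pySetD st.2.2 st.2.1 (PySem.List.pyGetD st.2.2 st.2.1 "" ++ p.2) ++ [""])

def debpe (toks : List String) : (List (Int × Int)) × List String :=
  let st := (PySem.List.enumerate toks).foldl debpeStepA (PySem.Dict.empty, 0, [""])
  (st.1.items, PySem.List.slice st.2.2 none (some (-1)))

-- ===== PORT B =====
-- pass 1 of Source B: idx_map[i] = running count of finished words before i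
def debpeStepIdx (st : PySem.Dict Int Int × Int) (p : Int × String) :
    PySem.Dict Int Int × Int :=
  (st.1.insert p.1 st.2, if PySem.Str.endswith p.2 "@@" then st.2 else st.2 + 1)

-- pass 2 of Source B: group tokens into words; the trailing unterminated group is never emitted
def debpeStepGrp (st : List String × String) (tok : String) : List String × String :=
  if PySem.Str.endswith tok "@@" then
    (st.1, st.2 ++ PySem.Str.slice tok none (some (-2)))
  else
    (st.1 ++ [st.2 ++ tok], "")

def debpe_alt (toks : List String) : (List (Int × Int)) × List String :=
  let im := (PySem.List.enumerate toks).foldl debpeStepIdx (PySem.Dict.empty, 0)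
  let gr := toks.foldl debpeStepGrp ([], "")
  (im.1.items, gr.1)

-- ===== PRECONDITION & SPEC =====
def Spec_debpe (toks : List String) (out : (List (Int × Int)) × List String) : Prop := out = debpe_alt toks
instance (toks : List String) (out : (List (Int × Int)) × List String) : Decidable (Spec_debpe toks out) := by unfold Spec_debpe; infer_instance

-- ===== CLAIM (what is proved, stated in full; the proofs are below) =====
def Claim_equal_debpe : Prop := ∀ (toks : List String), Dom_debpe toks → Spec_debpe toks (debpe toks)

-- ===== LEMMAS AND PROOFS =====

-- common abstract results both loops are reduced to
def idxAbs (s c : Int) : List String → List (Int × Int)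
  | [] => []
  | t :: ts => (s, c) :: idxAbs (s + 1) (if PySem.Str.endswith t "@@" then c else c + 1) ts

def cntAbs (c : Int) : List String → Int
  | [] => c
  | t :: ts => cntAbs (if PySem.Str.endswith t "@@" then c else c + 1) ts

def grpAbs (cur : String) : List String → List String
  | [] => []
  | t :: ts =>
    if PySem.Str.endswith t "@@" then grpAbs (cur ++ PySem.Str.slice t none (some (-2))) ts
    else (cur ++ t) :: grpAbs "" ts

def lastCur (cur : String) : List String → String
  | [] => cur
  | t :: ts =>
    if PySem.Str.endswith t "@@" then lastCur (cur ++ PySem.Str.slice t none (some (-2))) ts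
    else lastCur "" ts

theorem pyGetD_concat (done : List String) (cur : String) :
    PySem.List.pyGetD (done ++ [cur]) (done.length : Int) "" = cur := by
  simp [PySem.List.pyGetD_natCast, List.getD_eq_getElem?_getD]

theorem pySetD_concat (done : List String) (cur v : String) :
    PySem.List.pySetD (done ++ [cur]) (done.length : Int) v = done ++ [v] := by
  simp [PySem.List.pySetD, PySem.List.pySet?, PySem.List.pyIdx?]

theorem insert_fresh (d : PySem.Dict Int Int) (s v : Int) (h : ∀ k ∈ d.keys, k < s) :
    d.insert s v = PySem.Dict.mk (d.items ++ [(s, v)]) := by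
  have hc : d.contains s = false := by
    rw [← Bool.not_eq_true, PySem.Dict.contains_iff_mem_keys]
    exact fun hm => lt_irrefl s (h s hm)
  apply PySem.Dict.ext
  rw [PySem.Dict.items_insert_of_not_contains d v hc]

theorem keys_insert_fresh (d : PySem.Dict Int Int) (s v : Int) (h : ∀ k ∈ d.keys, k < s) :
    (d.insert s v).keys = d.keys ++ [s] := by
  have hc : d.contains s = false := by
    rw [← Bool.not_eq_true, PySem.Dict.contains_iff_mem_keys]
    exact fun hm => lt_irrefl s (h s hm)
  exact PySem.Dict.keys_insert_of_not_contains d v hc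

theorem foldA (toks : List String) : ∀ (s : Int) (d : PySem.Dict Int Int)
    (done : List String) (cur : String), (∀ k ∈ d.keys, k < s) →
    (PySem.List.enumerate toks s).foldl debpeStepA (d, (done.length : Int), done ++ [cur]) =
      (PySem.Dict.mk (d.items ++ idxAbs s done.length toks), cntAbs done.length toks,
        (done ++ grpAbs cur toks) ++ [lastCur cur toks]) := by
  induction toks with
  | nil =>
    intro s d done cur h
    simp [PySem.List.enumerate, idxAbs, cntAbs, grpAbs, lastCur]
  | cons t ts ih =>
    intro s d done cur h
    have h' : ∀ k ∈ (d.insert s done.length).keys, k < s + 1 := by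
      rw [keys_insert_fresh d s done.length h]
      intro k hk
      rcases List.mem_append.mp hk with hk | hk
      · exact lt_trans (h k hk) (by omega)
      · simp at hk; omega
    rw [PySem.List.enumerate_cons, List.foldl_cons]
    by_cases hcase : PySem.Str.endswith t "@@" = true
    · have hc2 : PySem.Chars.endswith t.toList ['@', '@'] = true := by simpa using hcase
      have hstep : debpeStepA (d, (done.length : Int), done ++ [cur]) (s, t) =
          (d.insert s done.length, (done.length : Int),
            done ++ [cur ++ PySem.Str.slice t none (some (-2))]) := by
        simp only [debpeStepA, hcase, if_pos, pyGetD_concat, pySetD_concat]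
      rw [hstep, ih (s+1) _ done _ h', insert_fresh d s done.length h]
      simp [idxAbs, cntAbs, grpAbs, lastCur, hc2]
    · have hc2 : PySem.Chars.endswith t.toList ['@', '@'] = false := by
        simpa using hcase
      have hstep : debpeStepA (d, (done.length : Int), done ++ [cur]) (s, t) =
          (d.insert s done.length, ((done ++ [cur ++ t]).length : Int),
            (done ++ [cur ++ t]) ++ [""]) := by
        simp only [debpeStepA, hcase, pyGetD_concat, pySetD_concat]
        push_cast
        simp
      rw [hstep, ih (s+1) _ (done ++ [cur ++ t]) "" h']
      rw [insert_fresh d s done.length h]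
      simp only [List.length_append, List.length_cons, List.length_nil]
      simp [idxAbs, cntAbs, grpAbs, lastCur, hc2]

theorem foldIdx (toks : List String) : ∀ (s c : Int) (d : PySem.Dict Int Int),
    (∀ k ∈ d.keys, k < s) →
    (PySem.List.enumerate toks s).foldl debpeStepIdx (d, c) =
      (PySem.Dict.mk (d.items ++ idxAbs s c toks), cntAbs c toks) := by
  induction toks with
  | nil =>
    intro s c d h
    simp [PySem.List.enumerate, idxAbs, cntAbs]
  | cons t ts ih =>
    intro s c d h
    have h' : ∀ k ∈ (d.insert s c).keys, k < s + 1 := by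
      rw [keys_insert_fresh d s c h]
      intro k hk
      rcases List.mem_append.mp hk with hk | hk
      · exact lt_trans (h k hk) (by omega)
      · simp at hk; omega
    rw [PySem.List.enumerate_cons, List.foldl_cons]
    show (PySem.List.enumerate ts (s+1)).foldl debpeStepIdx
        (d.insert s c, if PySem.Str.endswith t "@@" then c else c + 1) = _
    rw [ih (s+1) _ _ h', insert_fresh d s c h]
    simp [idxAbs, cntAbs]

theorem foldGrp (toks : List String) : ∀ (done : List String) (cur : String),
    toks.foldl debpeStepGrp (done, cur) = (done ++ grpAbs cur toks, lastCur cur toks) := by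
  induction toks with
  | nil => intro done cur; simp [grpAbs, lastCur]
  | cons t ts ih =>
    intro done cur
    by_cases h : PySem.Chars.endswith t.toList ['@', '@'] = true
    · simp [List.foldl_cons, debpeStepGrp, h, grpAbs, lastCur, ih]
    · simp [List.foldl_cons, debpeStepGrp, h, grpAbs, lastCur, ih]

-- ===== VERDICT (by name: the statement is the Claim_ definition above) =====
theorem debpe_spec : Claim_equal_debpe := by
  intro toks _
  unfold Spec_debpe debpe debpe_alt
  have hA := foldA toks 0 PySem.Dict.empty [] "" (by simp [PySem.Dict.keys_empty])
  have hI := foldIdx toks 0 0 PySem.Dict.empty (by simp [PySem.Dict.keys_empty])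
  simp only [List.length_nil, Int.natCast_zero, List.nil_append] at hA
  rw [hA, hI, foldGrp]
  simp [PySem.List.slice_to_neg_one]
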